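-- pv_equiv track=rewrite | github.com/oni-nick/algorithm_study | Full_Search/01.py | solution
-- ===== SOURCE A (Python) =====
-- def solution(answers):
--     answer = []
--     cnt = [0, 0, 0]
--     s1 = [1, 2, 3, 4, 5]
--     s2 = [2, 1, 2, 3, 2, 4, 2, 5]
--     s3 = [3, 3, 1, 1, 2, 2, 4, 4, 5, 5]
--     sss = [s1, s2, s3]
--     for i in range(3):
--         if len(answers) <= len(sss[i]):
--             sss[i] = sss[i][:len(answers)]
--         else:
--             sss[i] = sss[i] * (len(answers) // len(sss[i]) + 1)  # 리스트 확장
--             sss[i] = sss[i][:len(answers)]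
--
--     for i in range(len(answers)):
--         if answers[i] == sss[0][i]:
--             cnt[0] += 1
--         if answers[i] == sss[1][i]:
--             cnt[1] += 1
--         if answers[i] == sss[2][i]:
--             cnt[2] += 1
--
--     max_ = max(cnt)
--     for i in range(3):
--         if max_ == cnt[i]:
--             answer.append(i + 1)
--     return answer
-- ===== SOURCE B (Python) =====
-- def solution(answers):
--     # One grouping pass: histogram of (index mod 40, value); 40 = lcm(5, 8, 10).
--     freq = {}
--     for i, a in enumerate(answers):
--         k = (i % 40, a)
--         freq[k] = freq.get(k, 0) + 1
--     patterns = [[1, 2, 3, 4, 5],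
--                 [2, 1, 2, 3, 2, 4, 2, 5],
--                 [3, 3, 1, 1, 2, 2, 4, 4, 5, 5]]
--     # Each pattern's score is 40 table lookups; no per-element comparison against patterns.
--     cnt = [sum(freq.get((t, p[t % len(p)]), 0) for t in range(40)) for p in patterns]
--     m = max(cnt)
--     return [j + 1 for j, c in enumerate(cnt) if c == m]
-- ===== Notes on version B (the rewrite author's own statement) =====
-- stated objective: alternative
-- what changed: A extends each of the three patterns to len(answers) and compares element-by-element with three mutable counters; B instead builds a frequency table keyed by (index mod 40, value) in one grouping pass (40 = lcm of the pattern lengths) and obtains each pattern's score as 40 table lookups, so no per-element comparison against any pattern remains.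
import Mathlib
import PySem

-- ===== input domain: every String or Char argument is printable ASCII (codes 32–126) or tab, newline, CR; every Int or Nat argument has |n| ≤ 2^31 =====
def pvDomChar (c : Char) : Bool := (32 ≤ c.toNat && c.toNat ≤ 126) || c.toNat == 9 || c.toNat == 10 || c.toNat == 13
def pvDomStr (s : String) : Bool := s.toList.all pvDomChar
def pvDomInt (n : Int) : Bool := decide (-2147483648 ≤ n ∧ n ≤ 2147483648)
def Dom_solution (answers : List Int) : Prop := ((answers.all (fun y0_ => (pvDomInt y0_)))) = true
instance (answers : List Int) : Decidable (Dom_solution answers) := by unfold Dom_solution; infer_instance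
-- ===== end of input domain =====

-- B replaces A's extend-patterns-then-compare-per-element scheme by a grouping pass:
-- a frequency table keyed by (index mod 40, value) built once, then each pattern's
-- score is 40 table lookups (40 = lcm of the pattern lengths); same O(n) cost.


-- ===== PORT A =====
-- Python 'list * k' (hand-ported, exact: empty for k ≤ 0, else k concatenated copies)
def pyListMul {α : Type} (s : List α) (k : Int) : List α :=
  if k ≤ 0 then [] else (List.replicate k.toNat s).flatten

-- the first loop of A, for one pattern: truncate or extend-then-truncate to len(answers)
def extendA (s : List Int) (n : Nat) : List Int :=
  if (n : Int) ≤ (s.length : Int) then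
    PySem.List.slice s none (some (n : Int))
  else
    PySem.List.slice
      (pyListMul s (PySem.Int.floordiv (n : Int) (s.length : Int) + 1))
      none (some (n : Int))

def solution (answers : List Int) : List Int :=
  let s1 : List Int := [1, 2, 3, 4, 5]
  let s2 : List Int := [2, 1, 2, 3, 2, 4, 2, 5]
  let s3 : List Int := [3, 3, 1, 1, 2, 2, 4, 4, 5, 5]
  let e1 := extendA s1 answers.length
  let e2 := extendA s2 answers.length
  let e3 := extendA s3 answers.length
  -- second loop: three counters incremented in one pass over the indices
  let cnt : Int × Int × Int :=
    (PySem.List.pyRange 0 (answers.length : Int) 1).foldl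
      (fun c i =>
        (if PySem.List.pyGetD answers i 0 = PySem.List.pyGetD e1 i 0 then c.1 + 1 else c.1,
         if PySem.List.pyGetD answers i 0 = PySem.List.pyGetD e2 i 0 then c.2.1 + 1 else c.2.1,
         if PySem.List.pyGetD answers i 0 = PySem.List.pyGetD e3 i 0 then c.2.2 + 1 else c.2.2))
      (0, 0, 0)
  -- max_ = max(cnt): cnt always has three elements, so max? is never none
  let maxv := (PySem.List.max? [cnt.1, cnt.2.1, cnt.2.2] id).getD 0
  (if maxv = cnt.1 then [1] else []) ++
    (if maxv = cnt.2.1 then [2] else []) ++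
    (if maxv = cnt.2.2 then [3] else [])

-- ===== PORT B =====
-- the grouping pass: freq[(i % 40, a)] = freq.get(…, 0) + 1 over enumerate(answers)
def freqB (answers : List Int) : PySem.Dict (Int × Int) Int :=
  (PySem.List.enumerate answers).foldl
    (fun d ia => d.modify (PySem.Int.mod ia.1 40, ia.2) 0 (· + 1)) PySem.Dict.empty

-- sum(freq.get((t, p[t % len(p)]), 0) for t in range(40))
def scoreB (freq : PySem.Dict (Int × Int) Int) (p : List Int) : Int :=
  ((PySem.List.pyRange 0 40 1).map
    (fun t => freq.getD (t, PySem.List.pyGetD p (PySem.Int.mod t (p.length : Int)) 0) 0)).sum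

def solution_alt (answers : List Int) : List Int :=
  let freq := freqB answers
  let patterns : List (List Int) :=
    [[1, 2, 3, 4, 5], [2, 1, 2, 3, 2, 4, 2, 5], [3, 3, 1, 1, 2, 2, 4, 4, 5, 5]]
  let cnt := patterns.map (scoreB freq)
  -- max(cnt): cnt always has three elements, so max? is never none
  let m := (PySem.List.max? cnt id).getD 0
  (PySem.List.enumerate cnt).filterMap (fun jc => if jc.2 = m then some (jc.1 + 1) else none)

-- ===== PRECONDITION & SPEC =====
def Spec_solution (answers : List Int) (out : List Int) : Prop := out = solution_alt answers
instance (answers : List Int) (out : List Int) : Decidable (Spec_solution answers out) := by unfold Spec_solution; infer_instance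

-- ===== CLAIM (what is proved, stated in full; the proofs are below) =====
def Claim_equal_solution : Prop := ∀ (answers : List Int), Dom_solution answers → Spec_solution answers (solution answers)

-- ===== LEMMAS AND PROOFS =====

-- reference count: matches of xs against pattern p read cyclically starting at offset k
def cntMod (p : List Int) : List Int → Nat → Int
  | [], _ => 0
  | a :: t, k => (if a = p.getD (k % p.length) 0 then 1 else 0) + cntMod p t (k + 1)

-- the key list of B's grouping pass
def keysB (answers : List Int) : List (Int × Int) :=
  (PySem.List.enumerate answers).map (fun ia => (PySem.Int.mod ia.1 40, ia.2))

-- B's dict getD is the count of the key in the key list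
lemma freqB_getD (answers : List Int) (v : Int × Int) :
    (freqB answers).getD v 0 = ((keysB answers).count v : Int) := by
  unfold freqB keysB
  have h : (PySem.List.enumerate answers).foldl
      (fun d ia => PySem.Dict.modify d (PySem.Int.mod ia.1 40, ia.2) 0 (· + 1))
      (PySem.Dict.empty : PySem.Dict (Int × Int) Int)
    = ((PySem.List.enumerate answers).map (fun ia => (PySem.Int.mod ia.1 40, ia.2))).foldl
      (fun d x => PySem.Dict.modify d x 0 (· + 1)) PySem.Dict.empty :=
    (List.foldl_map (f := fun ia : Int × Int => (PySem.Int.mod ia.1 40, ia.2))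
      (g := fun d x => PySem.Dict.modify d x 0 (· + 1))
      (l := PySem.List.enumerate answers) (init := PySem.Dict.empty)).symm
  rw [h, PySem.Dict.getD_foldl_modify_add_one]
  simp

-- every key of B's table has first component in [0, 40)
lemma keysB_bounds (answers : List Int) :
    ∀ v ∈ keysB answers, 0 ≤ v.1 ∧ v.1 < 40 := by
  intro v hv
  unfold keysB at hv
  rcases List.mem_map.1 hv with ⟨ia, _, rfl⟩
  exact ⟨PySem.Int.mod_nonneg _ (by norm_num), PySem.Int.mod_lt _ (by norm_num)⟩

-- one element's contribution to the 40-term lookup sum is its match indicator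
lemma sum_indicator_single (e : Int → Int) (x : Int × Int)
    (h0 : 0 ≤ x.1) (h40 : x.1 < 40) :
    ((PySem.List.pyRange 0 40 1).map (fun t => if x = (t, e t) then (1 : Int) else 0)).sum
    = if x.2 = e x.1 then (1 : Int) else 0 := by
  have hP : ∀ t : Int, (x = (t, e t)) ↔ (t = x.1 ∧ x.2 = e x.1) := by
    intro t
    constructor
    · rintro rfl; exact ⟨rfl, rfl⟩
    · rintro ⟨rfl, h⟩; exact Prod.ext rfl h
  by_cases hm : x.2 = e x.1
  · have : ∀ t : Int, (if x = (t, e t) then (1 : Int) else 0) = (if t = x.1 then 1 else 0) := by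
      intro t; simp [hP t, hm]
    simp only [this]
    rw [show (fun t : Int => if t = x.1 then (1:Int) else 0)
          = (fun t : Int => if decide (t = x.1) then (1:Int) else 0) by funext t; simp,
        PySem.List.sum_map_ite_one_zero]
    rw [if_pos hm]
    have hcnt : List.countP (fun t : Int => decide (t = x.1)) (PySem.List.pyRange 0 40 1) = 1 := by
      have hnd := PySem.List.nodup_pyRange_one (a := 0) (b := 40)
      have hmem : x.1 ∈ PySem.List.pyRange 0 40 1 :=
        (PySem.List.mem_pyRange_one).2 ⟨h0, h40⟩
      rw [show (fun t : Int => decide (t = x.1)) = (· == x.1) by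
            funext t; by_cases h : t = x.1 <;> simp [h]]
      rw [← List.count]
      exact List.count_eq_one_of_mem hnd hmem
    rw [hcnt]; norm_num
  · have : ∀ t : Int, (if x = (t, e t) then (1 : Int) else 0) = 0 := by
      intro t; simp [hP t, hm]
    simp only [this]
    simp [hm]

-- swapping the sums: the 40-term count sum is the per-element match sum
lemma sum_count_eq (e : Int → Int) :
    ∀ (ks : List (Int × Int)), (∀ v ∈ ks, 0 ≤ v.1 ∧ v.1 < 40) →
    ((PySem.List.pyRange 0 40 1).map (fun t => (ks.count (t, e t) : Int))).sum
    = (ks.map (fun v => if v.2 = e v.1 then (1 : Int) else 0)).sum := by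
  intro ks
  induction ks with
  | nil => intro _; simp
  | cons x t ih =>
    intro hb
    have hx := hb x (by simp)
    have hstep : ∀ u : Int,
        ((x :: t).count (u, e u) : Int)
        = (t.count (u, e u) : Int) + (if x = (u, e u) then (1 : Int) else 0) := by
      intro u
      rw [List.count_cons]
      push_cast
      congr 1
      simp [beq_iff_eq]
    simp only [hstep]
    rw [PySem.List.sum_map_add_int, ih (fun v hv => hb v (by simp [hv])),
        sum_indicator_single e x hx.1 hx.2]
    simp only [List.map_cons, List.sum_cons]
    ring

-- B's per-element match sum (with the double mod) equals the reference count
lemma sumB_eq_cntMod (p : List Int) (hdvd : p.length ∣ 40) :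
    ∀ (xs : List Int) (k : Nat),
    ((PySem.List.enumerate xs (k : Int)).map
      (fun ia =>
        if ia.2 = PySem.List.pyGetD p
            (PySem.Int.mod (PySem.Int.mod ia.1 40) (p.length : Int)) 0
        then (1 : Int) else 0)).sum
    = cntMod p xs k := by
  intro xs
  induction xs with
  | nil => intro k; simp [PySem.List.enumerate, cntMod]
  | cons a t ih =>
    intro k
    rw [PySem.List.enumerate_cons]
    have hk1 : (k : Int) + 1 = ((k + 1 : Nat) : Int) := by push_cast; ring
    have hmod : PySem.Int.mod (PySem.Int.mod (k : Int) 40) (p.length : Int)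
        = ((k % p.length : Nat) : Int) := by
      rw [show ((40 : Int)) = ((40 : Nat) : Int) by norm_num, PySem.Int.mod_natCast,
        PySem.Int.mod_natCast, Nat.mod_mod_of_dvd k hdvd]
    simp only [List.map_cons, List.sum_cons, cntMod, hk1, ih, hmod,
      PySem.List.pyGetD_natCast]

-- B's score of one pattern equals the reference count
lemma scoreB_eq_cntMod (p : List Int) (hdvd : p.length ∣ 40) (answers : List Int) :
    scoreB (freqB answers) p = cntMod p answers 0 := by
  unfold scoreB
  simp only [freqB_getD]
  rw [sum_count_eq (fun t => PySem.List.pyGetD p (PySem.Int.mod t (p.length : Int)) 0)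
        (keysB answers) (keysB_bounds answers)]
  unfold keysB
  rw [List.map_map]
  rw [← sumB_eq_cntMod p hdvd answers 0]
  rfl

-- A's machinery -----------------------------------------------------------

lemma sum_range_eq_cntMod (p : List Int) : ∀ (xs : List Int) (k : Nat),
    ((List.range xs.length).map
      (fun t => if xs.getD t 0 = p.getD ((k + t) % p.length) 0 then (1 : Int) else 0)).sum
    = cntMod p xs k := by
  intro xs
  induction xs with
  | nil => intro k; simp [cntMod]
  | cons a t ih =>
    intro k
    rw [List.length_cons, List.range_succ_eq_map]
    simp only [List.map_cons, List.map_map, List.sum_cons, cntMod,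
      List.getD_cons_zero, Nat.add_zero]
    congr 1
    rw [← ih (k + 1)]
    apply congrArg
    apply List.map_congr_left
    intro s _
    have h1 : k + (s + 1) = (k + 1) + s := by omega
    simp [Function.comp, Nat.succ_eq_add_one, h1]

-- getD of k concatenated copies of s, inside bounds, is cyclic indexing
lemma flat_rep_getD (s : List Int) : ∀ (K : Nat) (t : Nat), t < K * s.length →
    ((List.replicate K s).flatten).getD t 0 = s.getD (t % s.length) 0 := by
  intro K
  induction K with
  | zero => intro t ht; omega
  | succ K ih =>
    intro t ht
    rw [List.replicate_succ, List.flatten_cons]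
    by_cases h : t < s.length
    · rw [List.getD_eq_getElem?_getD, List.getElem?_append_left h,
        Nat.mod_eq_of_lt h, ← List.getD_eq_getElem?_getD]
    · rw [Nat.not_lt] at h
      have hmul : (K + 1) * s.length = K * s.length + s.length := by ring
      rw [List.getD_eq_getElem?_getD, List.getElem?_append_right h,
        ← List.getD_eq_getElem?_getD, ih (t - s.length) (by omega)]
      have h2 : t % s.length = (t - s.length) % s.length := by
        conv_lhs => rw [show t = (t - s.length) + s.length by omega]
        rw [Nat.add_mod_right]
      rw [h2]

-- the extended pattern of A, at any index below len(answers), is cyclic indexing into s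
lemma extendA_getD (s : List Int) (hs : s ≠ []) (n t : Nat) (ht : t < n) :
    (extendA s n).getD t 0 = s.getD (t % s.length) 0 := by
  have hlen : 0 < s.length := List.length_pos_iff.mpr hs
  unfold extendA
  by_cases h : (n : Int) ≤ (s.length : Int)
  · rw [if_pos h, PySem.List.slice_to s (by positivity)]
    have hns : n ≤ s.length := by exact_mod_cast h
    rw [Int.toNat_natCast, List.getD_eq_getElem?_getD, List.getElem?_take_of_lt ht,
      ← List.getD_eq_getElem?_getD, Nat.mod_eq_of_lt (by omega)]
  · rw [if_neg h]
    have hK : PySem.Int.floordiv (n : Int) (s.length : Int) + 1 = ((n / s.length + 1 : Nat) : Int) := by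
      rw [PySem.Int.floordiv_natCast]; push_cast; ring
    rw [hK]
    unfold pyListMul
    have hq : ¬ ((((n / s.length + 1 : Nat) : Int)) ≤ 0) := by
      rw [not_le]
      exact_mod_cast Nat.succ_pos (n / s.length)
    rw [if_neg hq, PySem.List.slice_to _ (by positivity), Int.toNat_natCast,
      Int.toNat_natCast, List.getD_eq_getElem?_getD, List.getElem?_take_of_lt ht,
      ← List.getD_eq_getElem?_getD]
    apply flat_rep_getD s
    calc t < n := ht
      _ < s.length * (n / s.length + 1) := Nat.lt_mul_div_succ n hlen
      _ = (n / s.length + 1) * s.length := Nat.mul_comm _ _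

-- the three-counter fold, split into three independent sums
lemma foldl_triple_add (l : List Int) (f g h : Int → Int) :
    ∀ (a b c : Int),
      l.foldl (fun c i => (c.1 + f i, c.2.1 + g i, c.2.2 + h i)) (a, b, c)
      = (a + (l.map f).sum, b + (l.map g).sum, c + (l.map h).sum) := by
  induction l with
  | nil => intro a b c; simp
  | cons x t ih =>
    intro a b c
    simp only [List.foldl_cons, List.map_cons, List.sum_cons, ih]
    refine Prod.ext (by ring) (Prod.ext (by ring) (by ring))

-- A's counter for one pattern equals the reference count
lemma countA_eq_cntMod (s : List Int) (hs : s ≠ []) (answers : List Int) :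
    ((PySem.List.pyRange 0 (answers.length : Int)).map
      (fun i => if PySem.List.pyGetD answers i 0 = PySem.List.pyGetD (extendA s answers.length) i 0
                then (1 : Int) else 0)).sum
    = cntMod s answers 0 := by
  rw [PySem.List.pyRange_zero_nat, List.map_map, ← sum_range_eq_cntMod s answers 0]
  congr 1
  apply List.map_congr_left
  intro t htm
  rw [List.mem_range] at htm
  simp only [Function.comp, PySem.List.pyGetD_natCast, Nat.zero_add,
    extendA_getD s hs answers.length t htm, Nat.zero_add]

-- ===== VERDICT (by name: the statement is the Claim_ definition above) =====
set_option maxHeartbeats 1000000 in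
theorem solution_spec : Claim_equal_solution := by
  intro answers _
  unfold Spec_solution solution solution_alt
  simp only [List.map_cons, List.map_nil,
    scoreB_eq_cntMod [1,2,3,4,5] (by norm_num) answers,
    scoreB_eq_cntMod [2,1,2,3,2,4,2,5] (by norm_num) answers,
    scoreB_eq_cntMod [3,3,1,1,2,2,4,4,5,5] (by norm_num) answers]
  have hstep :
      (fun (c : Int × Int × Int) i =>
        (if PySem.List.pyGetD answers i 0 = PySem.List.pyGetD (extendA [1,2,3,4,5] answers.length) i 0 then c.1 + 1 else c.1,
         if PySem.List.pyGetD answers i 0 = PySem.List.pyGetD (extendA [2,1,2,3,2,4,2,5] answers.length) i 0 then c.2.1 + 1 else c.2.1,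
         if PySem.List.pyGetD answers i 0 = PySem.List.pyGetD (extendA [3,3,1,1,2,2,4,4,5,5] answers.length) i 0 then c.2.2 + 1 else c.2.2))
      = (fun (c : Int × Int × Int) i =>
        (c.1 + (if PySem.List.pyGetD answers i 0 = PySem.List.pyGetD (extendA [1,2,3,4,5] answers.length) i 0 then (1:Int) else 0),
         c.2.1 + (if PySem.List.pyGetD answers i 0 = PySem.List.pyGetD (extendA [2,1,2,3,2,4,2,5] answers.length) i 0 then (1:Int) else 0),
         c.2.2 + (if PySem.List.pyGetD answers i 0 = PySem.List.pyGetD (extendA [3,3,1,1,2,2,4,4,5,5] answers.length) i 0 then (1:Int) else 0))) := by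
    funext c i
    refine Prod.ext (by split_ifs <;> ring) (Prod.ext (by split_ifs <;> ring) (by split_ifs <;> ring))
  rw [hstep, foldl_triple_add]
  rw [countA_eq_cntMod [1,2,3,4,5] (by simp) answers,
      countA_eq_cntMod [2,1,2,3,2,4,2,5] (by simp) answers,
      countA_eq_cntMod [3,3,1,1,2,2,4,4,5,5] (by simp) answers]
  simp only [zero_add]
  set c1 := cntMod [1,2,3,4,5] answers 0
  set c2 := cntMod [2,1,2,3,2,4,2,5] answers 0
  set c3 := cntMod [3,3,1,1,2,2,4,4,5,5] answers 0
  set m := (PySem.List.max? [c1, c2, c3] id).getD 0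
  simp only [PySem.List.enumerate_cons, PySem.List.enumerate_nil,
    List.filterMap_cons, List.filterMap_nil]
  by_cases h1 : c1 = m <;> by_cases h2 : c2 = m <;> by_cases h3 : c3 = m <;>
    simp [h1, h2, h3, eq_comm]
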